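-- pv_equiv track=rewrite | github.com/tomerfry/GhidraScripts | tg_old_ast_query.py | _tokenize_c_like
-- ===== SOURCE A (Python) =====
-- def _tokenize_c_like(query_str):
--     """Enhanced tokenizer for C-like syntax"""
--     tokens = []
--     current = ""
--     in_string = False
--     in_char = False
--
--     i = 0
--     while i < len(query_str):
--         char = query_str[i]
--
--         # Handle string literals
--         if char == '"' and not in_char:
--             if in_string:
--                 current += char
--                 tokens.append(current)
--                 current = ""
--                 in_string = False
--             else:
--                 if current:
--                     tokens.append(current)
--                     current = ""
--                 current += char
--                 in_string = True
--         elif in_string: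
--             current += char
--         # Handle char literals
--         elif char == "'" and not in_string:
--             if in_char:
--                 current += char
--                 tokens.append(current)
--                 current = ""
--                 in_char = False
--             else:
--                 if current:
--                     tokens.append(current)
--                     current = ""
--                 current += char
--                 in_char = True
--         elif in_char:
--             current += char
--         # Handle multi-character operators
--         elif i + 1 < len(query_str) and query_str[i:i+2] in ['==', '!=', '<=', '>=', '->', '&&', '||', '++', '--', '<<', '>>', '+=', '-=', '*=', '/=']:
--             if current:
--                 tokens.append(current)
--                 current = ""
--             tokens.append(query_str[i:i+2])
--             i += 1  # Skip next char
--         # Handle single character tokens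
--         elif char in '(){}[];,=<>!&|+-*/%^~.':
--             if current:
--                 tokens.append(current)
--                 current = ""
--             tokens.append(char)
--         # Handle whitespace
--         elif char in ' \t\n\r':
--             if current:
--                 tokens.append(current)
--                 current = ""
--         else:
--             current += char
--
--         i += 1
--
--     if current:
--         tokens.append(current)
--
--     return tokens
-- ===== SOURCE B (Python) =====
-- _OPS2 = {'==', '!=', '<=', '>=', '->', '&&', '||', '++', '--', '<<', '>>', '+=', '-=', '*=', '/='}
-- _SINGLE = set('(){}[];,=<>!&|+-*/%^~.')
-- _WS = set(' \t\n\r')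
--
--
-- def _tokenize_c_like(query_str):
--     """Token-at-a-time scanner: emits each whole token directly instead of
--     maintaining an accumulator and in_string/in_char state flags."""
--     tokens = []
--     i = 0
--     n = len(query_str)
--     while i < n:
--         c = query_str[i]
--         if c == '"' or c == "'":
--             j = query_str.find(c, i + 1)
--             if j == -1:
--                 tokens.append(query_str[i:])
--                 i = n
--             else:
--                 tokens.append(query_str[i:j + 1])
--                 i = j + 1
--         elif query_str[i:i + 2] in _OPS2:
--             tokens.append(query_str[i:i + 2])
--             i += 2
--         elif c in _SINGLE:
--             tokens.append(c)
--             i += 1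
--         elif c in _WS:
--             i += 1
--         else:
--             j = i + 1
--             while j < n and query_str[j] not in _SINGLE and query_str[j] not in _WS and query_str[j] != '"' and query_str[j] != "'":
--                 j += 1
--             tokens.append(query_str[i:j])
--             i = j
--     return tokens
-- ===== Notes on version B (the rewrite author's own statement) =====
-- stated objective: simpler
-- what changed: Replaced A's char-by-char accumulator state machine (current buffer plus in_string/in_char flags) with a token-at-a-time scanner that at each position emits one whole token directly: a quoted literal via str.find of the closing quote, a two-char operator, a single-char token, or a maximal identifier run.
import Mathlib
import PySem

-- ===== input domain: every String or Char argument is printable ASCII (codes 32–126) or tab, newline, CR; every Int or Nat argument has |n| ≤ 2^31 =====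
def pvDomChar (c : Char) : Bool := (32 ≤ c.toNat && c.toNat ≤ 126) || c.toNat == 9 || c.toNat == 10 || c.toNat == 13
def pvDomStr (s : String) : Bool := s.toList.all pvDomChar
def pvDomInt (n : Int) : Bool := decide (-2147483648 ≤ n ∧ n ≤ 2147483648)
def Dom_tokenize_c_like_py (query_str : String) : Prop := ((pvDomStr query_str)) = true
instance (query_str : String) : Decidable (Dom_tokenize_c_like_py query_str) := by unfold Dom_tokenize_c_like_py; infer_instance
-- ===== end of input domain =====

-- B is a token-at-a-time scanner (emit whole tokens, no accumulator/state flags) — simpler than A's char-by-char state machine.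

-- ===== PORT A =====
-- shared character classes (the literal sets both Pythons test membership in)
def pvOps2 : List (List Char) :=
  [['=','='], ['!','='], ['<','='], ['>','='], ['-','>'], ['&','&'], ['|','|'],
   ['+','+'], ['-','-'], ['<','<'], ['>','>'], ['+','='], ['-','='], ['*','='], ['/','=']]

def pvIsSingle (c : Char) : Bool :=
  ['(',')','{','}','[',']',';',',','=','<','>','!','&','|','+','-','*','/','%','^','~','.'].contains c

def pvIsWS (c : Char) : Bool := [' ', '\t', '\n', '\r'].contains c

def pvFlush (cur : List Char) : List (List Char) := if cur = [] then [] else [cur]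

-- literal transliteration of A's while-loop: state = (remaining chars, tokens, current, in_string, in_char)
def pvALoop : List Char → List (List Char) → List Char → Bool → Bool → List (List Char)
  | [], tok, cur, _, _ => tok ++ pvFlush cur
  | c :: cs, tok, cur, instr, inch =>
    if c = '"' ∧ inch = false then
      if instr = true then pvALoop cs (tok ++ [cur ++ [c]]) [] false inch
      else pvALoop cs (tok ++ pvFlush cur) [c] true inch
    else if instr = true then pvALoop cs tok (cur ++ [c]) instr inch
    else if c = '\'' ∧ instr = false then
      if inch = true then pvALoop cs (tok ++ [cur ++ [c]]) [] instr false
      else pvALoop cs (tok ++ pvFlush cur) [c] instr true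
    else if inch = true then pvALoop cs tok (cur ++ [c]) instr inch
    else
      match hcs : cs with
      | c2 :: cs2 =>
        if [c, c2] ∈ pvOps2 then pvALoop cs2 (tok ++ pvFlush cur ++ [[c, c2]]) [] instr inch
        else if pvIsSingle c then pvALoop cs (tok ++ pvFlush cur ++ [[c]]) [] instr inch
        else if pvIsWS c then pvALoop cs (tok ++ pvFlush cur) [] instr inch
        else pvALoop cs tok (cur ++ [c]) instr inch
      | [] =>
        if pvIsSingle c then pvALoop [] (tok ++ pvFlush cur ++ [[c]]) [] instr inch
        else if pvIsWS c then pvALoop [] (tok ++ pvFlush cur) [] instr inch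
        else pvALoop [] tok (cur ++ [c]) instr inch
termination_by l _ _ _ _ => l.length
decreasing_by all_goals (simp_all; try omega)

def tokenize_c_like_py (query_str : String) : List String :=
  (pvALoop query_str.toList [] [] false false).map String.mk

-- ===== PORT B =====
-- identifier characters: everything that is not a quote, a single-char token or whitespace
def pvIsIdent (c : Char) : Bool := !(c = '"' || c = '\'' || pvIsSingle c || pvIsWS c)

-- literal transliteration of B: emit one whole token per step
-- (str.find + slicing is rendered as takeWhile/dropWhile on the remaining chars)
def pvBLoop : List Char → List (List Char)
  | [] => []
  | c :: cs =>
    if c = '"' ∨ c = '\'' then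
      match h : cs.dropWhile (fun x => x ≠ c) with
      | [] => [c :: cs.takeWhile (fun x => x ≠ c)]
      | _ :: rest => ((c :: cs.takeWhile (fun x => x ≠ c)) ++ [c]) :: pvBLoop rest
    else
      match hcs : cs with
      | c2 :: cs2 =>
        if [c, c2] ∈ pvOps2 then [c, c2] :: pvBLoop cs2
        else if pvIsSingle c then [c] :: pvBLoop cs
        else if pvIsWS c then pvBLoop cs
        else (c :: cs.takeWhile pvIsIdent) :: pvBLoop (cs.dropWhile pvIsIdent)
      | [] =>
        if pvIsSingle c then [[c]]
        else if pvIsWS c then []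
        else [[c]]
termination_by l => l.length
decreasing_by all_goals
  (try have h1 := List.length_dropWhile_le (fun x => x ≠ c) cs
   try have h2 := List.length_dropWhile_le pvIsIdent cs
   simp_all
   try omega)

def tokenize_c_like_py_alt (query_str : String) : List String :=
  (pvBLoop query_str.toList).map String.mk

-- ===== PRECONDITION & SPEC =====
def Spec_tokenize_c_like_py (query_str : String) (out : List String) : Prop := out = tokenize_c_like_py_alt query_str
instance (query_str : String) (out : List String) : Decidable (Spec_tokenize_c_like_py query_str out) := by unfold Spec_tokenize_c_like_py; infer_instance

-- ===== CLAIM (what is proved, stated in full; the proofs are below) =====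
def Claim_equal_tokenize_c_like_py : Prop := ∀ (query_str : String), Dom_tokenize_c_like_py query_str → Spec_tokenize_c_like_py query_str (tokenize_c_like_py query_str)

-- ===== LEMMAS AND PROOFS =====

theorem pvALoop_nil (tok : List (List Char)) (cur : List Char) (i j : Bool) :
    pvALoop [] tok cur i j = tok ++ pvFlush cur := by rw [pvALoop.eq_def]

theorem pvBLoop_nil : pvBLoop [] = [] := by rw [pvBLoop.eq_def]

-- every two-char operator starts with a single-char token character
theorem pv_opFirst (c c2 : Char) (h : [c, c2] ∈ pvOps2) : pvIsSingle c = true := by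
  simp [pvOps2] at h
  rcases h with ⟨rfl, rfl⟩|⟨rfl, rfl⟩|⟨rfl, rfl⟩|⟨rfl, rfl⟩|⟨rfl, rfl⟩|⟨rfl, rfl⟩|⟨rfl, rfl⟩|⟨rfl, rfl⟩|⟨rfl, rfl⟩|⟨rfl, rfl⟩|⟨rfl, rfl⟩|⟨rfl, rfl⟩|⟨rfl, rfl⟩|⟨rfl, rfl⟩|⟨rfl, rfl⟩ <;> rfl

theorem pv_tw_of_dw_nil {p : Char → Bool} : ∀ (l : List Char), l.dropWhile p = [] → l.takeWhile p = l := by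
  intro l
  induction l with
  | nil => intro _; rfl
  | cons a l ih =>
    intro h
    rw [List.dropWhile_cons] at h
    by_cases hp : p a = true
    · rw [if_pos hp] at h
      rw [List.takeWhile_cons, if_pos hp, ih h]
    · rw [if_neg hp] at h; simp at h

-- a single-char token character is not whitespace
theorem pv_single_not_ws (c : Char) (hs : pvIsSingle c = true) : pvIsWS c = false := by
  revert hs; simp [pvIsSingle, pvIsWS]; intro h
  rcases h with rfl|rfl|rfl|rfl|rfl|rfl|rfl|rfl|rfl|rfl|rfl|rfl|rfl|rfl|rfl|rfl|rfl|rfl|rfl|rfl|rfl|rfl <;> decide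

-- unfolding lemmas for pvBLoop's branches
theorem pvBLoop_quote (c : Char) (cs : List Char) (hq : c = '"' ∨ c = '\'') :
    pvBLoop (c :: cs) =
      (match cs.dropWhile (fun x => x ≠ c) with
       | [] => [c :: cs.takeWhile (fun x => x ≠ c)]
       | _ :: rest => ((c :: cs.takeWhile (fun x => x ≠ c)) ++ [c]) :: pvBLoop rest) := by
  rw [pvBLoop.eq_def]
  dsimp only
  rw [if_pos hq]
  split
  · next h => rw [h]
  · next q rest h => rw [h]

theorem pvBLoop_op (c c2 : Char) (cs2 : List Char) (hq : ¬(c = '"' ∨ c = '\''))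
    (hop : [c, c2] ∈ pvOps2) :
    pvBLoop (c :: c2 :: cs2) = [c, c2] :: pvBLoop cs2 := by
  rw [pvBLoop.eq_def]; simp [hq, hop]

theorem pvBLoop_single (c c2 : Char) (cs2 : List Char) (hq : ¬(c = '"' ∨ c = '\''))
    (hop : [c, c2] ∉ pvOps2) (hs : pvIsSingle c = true) :
    pvBLoop (c :: c2 :: cs2) = [c] :: pvBLoop (c2 :: cs2) := by
  rw [pvBLoop.eq_def]; simp [hq, hop, hs]

theorem pvBLoop_ws (c c2 : Char) (cs2 : List Char) (hq : ¬(c = '"' ∨ c = '\''))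
    (hop : [c, c2] ∉ pvOps2) (hs : pvIsSingle c = false) (hw : pvIsWS c = true) :
    pvBLoop (c :: c2 :: cs2) = pvBLoop (c2 :: cs2) := by
  rw [pvBLoop.eq_def]; simp [hq, hop, hs, hw]

theorem pvBLoop_ident (c c2 : Char) (cs2 : List Char) (hq : ¬(c = '"' ∨ c = '\''))
    (hop : [c, c2] ∉ pvOps2) (hs : pvIsSingle c = false) (hw : pvIsWS c = false) :
    pvBLoop (c :: c2 :: cs2) =
      (c :: (c2 :: cs2).takeWhile pvIsIdent) :: pvBLoop ((c2 :: cs2).dropWhile pvIsIdent) := by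
  rw [pvBLoop.eq_def]; simp [hq, hop, hs, hw]

theorem pvBLoop_one (c : Char) (hq : ¬(c = '"' ∨ c = '\'')) :
    pvBLoop [c] = if pvIsWS c = true then [] else [[c]] := by
  rw [pvBLoop.eq_def]
  by_cases hs : pvIsSingle c = true
  · have hw : pvIsWS c = false := by
      exact pv_single_not_ws c hs
    simp [hq, hs, hw]
  · by_cases hw : pvIsWS c = true
    · simp [hq, hs, hw]
    · simp [hq, hs, hw]

-- A in string mode consumes up to the closing double quote
theorem pv_A_str : ∀ (cs : List Char) (tok : List (List Char)) (cur : List Char), cur ≠ [] →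
    pvALoop cs tok cur true false =
      (match cs.dropWhile (fun x => x ≠ '"') with
       | [] => tok ++ [cur ++ cs]
       | _ :: rest => pvALoop rest (tok ++ [cur ++ cs.takeWhile (fun x => x ≠ '"') ++ ['"']]) [] false false) := by
  intro cs
  induction cs with
  | nil => intro tok cur hcur; simp [pvALoop_nil, pvFlush, hcur]
  | cons c cs ih =>
    intro tok cur hcur
    by_cases hc : c = '"'
    · subst hc
      rw [pvALoop.eq_def]; simp
    · have hstep : pvALoop (c :: cs) tok cur true false = pvALoop cs tok (cur ++ [c]) true false := by
        rw [pvALoop.eq_def]; simp [hc]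
      rw [hstep, ih _ (cur ++ [c]) (by simp)]
      rw [List.dropWhile_cons, List.takeWhile_cons]
      have hpc : (fun x => decide (x ≠ '"')) c = true := by simp [hc]
      simp only [hpc, if_pos]
      cases hdw : cs.dropWhile (fun x => x ≠ '"') with
      | nil => simp
      | cons q rest => simp

-- A in char mode consumes up to the closing single quote
theorem pv_A_chr : ∀ (cs : List Char) (tok : List (List Char)) (cur : List Char), cur ≠ [] →
    pvALoop cs tok cur false true =
      (match cs.dropWhile (fun x => x ≠ '\'') with
       | [] => tok ++ [cur ++ cs]
       | _ :: rest => pvALoop rest (tok ++ [cur ++ cs.takeWhile (fun x => x ≠ '\'') ++ ['\'']]) [] false false) := by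
  intro cs
  induction cs with
  | nil => intro tok cur hcur; simp [pvALoop_nil, pvFlush, hcur]
  | cons c cs ih =>
    intro tok cur hcur
    by_cases hc : c = '\''
    · subst hc
      rw [pvALoop.eq_def]; simp
    · have hstep : pvALoop (c :: cs) tok cur false true = pvALoop cs tok (cur ++ [c]) false true := by
        rw [pvALoop.eq_def]; simp [hc]
      rw [hstep, ih _ (cur ++ [c]) (by simp)]
      rw [List.dropWhile_cons, List.takeWhile_cons]
      have hpc : (fun x => decide (x ≠ '\'')) c = true := by simp [hc]
      simp only [hpc, if_pos]
      cases hdw : cs.dropWhile (fun x => x ≠ '\'') with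
      | nil => simp
      | cons q rest => simp

-- on a non-identifier character A first flushes the pending identifier
theorem pv_A_flush : ∀ (c : Char) (cs : List Char) (tok : List (List Char)) (cur : List Char),
    pvIsIdent c = false → cur ≠ [] →
    pvALoop (c :: cs) tok cur false false = pvALoop (c :: cs) (tok ++ [cur]) [] false false := by
  intro c cs tok cur hni hcur
  by_cases h1 : c = '"'
  · subst h1
    rw [pvALoop.eq_def]; conv => rhs; rw [pvALoop.eq_def]
    simp [pvFlush, hcur]
  · by_cases h2 : c = '\''
    · subst h2
      rw [pvALoop.eq_def]; conv => rhs; rw [pvALoop.eq_def]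
      simp [pvFlush, hcur]
    · have hsw : pvIsSingle c = true ∨ pvIsWS c = true := by
        simp [pvIsIdent, h1, h2] at hni
        by_cases hs : pvIsSingle c = true
        · exact Or.inl hs
        · exact Or.inr (hni (by simpa using hs))
      rw [pvALoop.eq_def]; conv => rhs; rw [pvALoop.eq_def]
      cases cs with
      | nil =>
        rcases hsw with hs | hw
        · simp [h1, h2, hs, pvFlush, hcur]
        · have hs : pvIsSingle c = false := by
            revert hw; simp [pvIsSingle, pvIsWS]
            intro h; rcases h with rfl|rfl|rfl|rfl <;> decide
          simp [h1, h2, hs, hw, pvFlush, hcur]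
      | cons c2 cs2 =>
        by_cases hop : [c, c2] ∈ pvOps2
        · simp [h1, h2, hop, pvFlush, hcur]
        · rcases hsw with hs | hw
          · simp [h1, h2, hop, hs, pvFlush, hcur]
          · have hs : pvIsSingle c = false := by
              revert hw; simp [pvIsSingle, pvIsWS]
              intro h; rcases h with rfl|rfl|rfl|rfl <;> decide
            simp [h1, h2, hop, hs, hw, pvFlush, hcur]

-- an identifier in progress absorbs the maximal run of identifier characters
theorem pv_A_ident : ∀ (cs : List Char) (tok : List (List Char)) (cur : List Char), cur ≠ [] →
    pvALoop cs tok cur false false =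
      (match cs.dropWhile pvIsIdent with
       | [] => tok ++ [cur ++ cs.takeWhile pvIsIdent]
       | d :: rest => pvALoop (d :: rest) (tok ++ [cur ++ cs.takeWhile pvIsIdent]) [] false false) := by
  intro cs
  induction cs with
  | nil => intro tok cur hcur; simp [pvALoop_nil, pvFlush, hcur]
  | cons c cs ih =>
    intro tok cur hcur
    by_cases hid : pvIsIdent c = true
    · have h1 : ¬ c = '"' := by revert hid; simp [pvIsIdent]; try tauto
      have h2 : ¬ c = '\'' := by revert hid; simp [pvIsIdent]; try tauto
      have hs : pvIsSingle c = false := by revert hid; simp [pvIsIdent]; try tauto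
      have hw : pvIsWS c = false := by revert hid; simp [pvIsIdent]; try tauto
      rw [List.dropWhile_cons, List.takeWhile_cons]
      simp only [hid, if_pos]
      cases cs with
      | nil =>
        rw [pvALoop.eq_def]
        simp [h1, h2, hs, hw, pvALoop_nil, pvFlush]
      | cons c2 cs2 =>
        have hop : [c, c2] ∉ pvOps2 := fun h => by simp [pv_opFirst c c2 h] at hs
        have hstep : pvALoop (c :: c2 :: cs2) tok cur false false
            = pvALoop (c2 :: cs2) tok (cur ++ [c]) false false := by
          rw [pvALoop.eq_def]; simp [h1, h2, hs, hw, hop]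
        rw [hstep, ih _ (cur ++ [c]) (by simp)]
        cases hdw : (c2 :: cs2).dropWhile pvIsIdent with
        | nil => simp
        | cons q rest => simp
    · have hni : pvIsIdent c = false := by simpa using hid
      rw [List.dropWhile_cons, List.takeWhile_cons]
      simp only [hni, Bool.false_eq_true, if_false]
      rw [pv_A_flush c cs tok cur hni hcur]
      simp

theorem pv_main : ∀ (n : Nat) (cs : List Char), cs.length ≤ n → ∀ tok,
    pvALoop cs tok [] false false = tok ++ pvBLoop cs := by
  intro n
  induction n with
  | zero =>
    intro cs h tok
    have hnil : cs = [] := by cases cs with | nil => rfl | cons a l => simp at h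
    subst hnil
    simp [pvALoop_nil, pvBLoop_nil, pvFlush]
  | succ n ih =>
    intro cs hlen tok
    cases cs with
    | nil => simp [pvALoop_nil, pvBLoop_nil, pvFlush]
    | cons c cs =>
      by_cases h1 : c = '"'
      · subst h1
        have hstep : pvALoop ('"' :: cs) tok [] false false = pvALoop cs tok ['"'] true false := by
          rw [pvALoop.eq_def]; simp [pvFlush]
        rw [hstep, pv_A_str cs tok ['"'] (by simp), pvBLoop_quote '"' cs (Or.inl rfl)]
        cases hdw : cs.dropWhile (fun x => x ≠ '"') with
        | nil => rw [pv_tw_of_dw_nil cs hdw]; simp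
        | cons q rest =>
          have hrest : rest.length ≤ n := by
            have h2 := List.length_dropWhile_le (fun x => decide (x ≠ '"')) cs
            rw [hdw] at h2; simp at h2 hlen; omega
          dsimp only
          rw [ih rest hrest]
          simp
      · by_cases h2 : c = '\''
        · subst h2
          have hstep : pvALoop ('\'' :: cs) tok [] false false = pvALoop cs tok ['\''] false true := by
            rw [pvALoop.eq_def]; simp [pvFlush]
          rw [hstep, pv_A_chr cs tok ['\''] (by simp), pvBLoop_quote '\'' cs (Or.inr rfl)]
          cases hdw : cs.dropWhile (fun x => x ≠ '\'') with
          | nil => rw [pv_tw_of_dw_nil cs hdw]; simp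
          | cons q rest =>
            have hrest : rest.length ≤ n := by
              have h3 := List.length_dropWhile_le (fun x => decide (x ≠ '\'')) cs
              rw [hdw] at h3; simp at h3 hlen; omega
            dsimp only
            rw [ih rest hrest]
            simp
        · have hq : ¬(c = '"' ∨ c = '\'') := by tauto
          cases cs with
          | nil =>
            rw [pvALoop.eq_def, pvBLoop_one c hq]
            by_cases hs : pvIsSingle c = true
            · have hw : pvIsWS c = false := pv_single_not_ws c hs
              simp [h1, h2, hs, hw, pvALoop_nil, pvFlush]
            · by_cases hw : pvIsWS c = true
              · simp [h1, h2, hs, hw, pvALoop_nil, pvFlush]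
              · simp [h1, h2, hs, hw, pvALoop_nil, pvFlush]
          | cons c2 cs2 =>
            have hlen2 : (c2 :: cs2).length ≤ n := by simp at hlen ⊢; omega
            by_cases hop : [c, c2] ∈ pvOps2
            · have hstep : pvALoop (c :: c2 :: cs2) tok [] false false
                  = pvALoop cs2 (tok ++ [[c, c2]]) [] false false := by
                rw [pvALoop.eq_def]; simp [h1, h2, hop, pvFlush]
              have hcs2 : cs2.length ≤ n := by simp at hlen; omega
              rw [hstep, ih cs2 hcs2, pvBLoop_op c c2 cs2 hq hop]
              simp
            · by_cases hs : pvIsSingle c = true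
              · have hstep : pvALoop (c :: c2 :: cs2) tok [] false false
                    = pvALoop (c2 :: cs2) (tok ++ [[c]]) [] false false := by
                  rw [pvALoop.eq_def]; simp [h1, h2, hop, hs, pvFlush]
                rw [hstep, ih (c2 :: cs2) hlen2, pvBLoop_single c c2 cs2 hq hop hs]
                simp
              · have hs' : pvIsSingle c = false := by simpa using hs
                by_cases hw : pvIsWS c = true
                · have hstep : pvALoop (c :: c2 :: cs2) tok [] false false
                      = pvALoop (c2 :: cs2) tok [] false false := by
                    rw [pvALoop.eq_def]; simp [h1, h2, hop, hs, hw, pvFlush]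
                  rw [hstep, ih (c2 :: cs2) hlen2, pvBLoop_ws c c2 cs2 hq hop hs' hw]
                · have hw' : pvIsWS c = false := by simpa using hw
                  have hstep : pvALoop (c :: c2 :: cs2) tok [] false false
                      = pvALoop (c2 :: cs2) tok [c] false false := by
                    rw [pvALoop.eq_def]; simp [h1, h2, hop, hs, hw, pvFlush]
                  rw [hstep, pv_A_ident (c2 :: cs2) tok [c] (by simp),
                    pvBLoop_ident c c2 cs2 hq hop hs' hw']
                  cases hdw : (c2 :: cs2).dropWhile pvIsIdent with
                  | nil =>
                    rw [pv_tw_of_dw_nil _ hdw]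
                    simp [pvBLoop_nil]
                  | cons d rest =>
                    have hrest : (d :: rest).length ≤ n := by
                      have h3 := List.length_dropWhile_le pvIsIdent (c2 :: cs2)
                      rw [hdw] at h3; simp at h3 hlen ⊢; omega
                    dsimp only
                    rw [ih (d :: rest) hrest]
                    simp

-- ===== VERDICT (by name: the statement is the Claim_ definition above) =====
theorem tokenize_c_like_py_spec : Claim_equal_tokenize_c_like_py := by
  intro q _
  unfold Spec_tokenize_c_like_py tokenize_c_like_py tokenize_c_like_py_alt
  rw [pv_main q.toList.length q.toList (Nat.le_refl _) []]; rfl
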